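-- pv_equiv track=rewrite | github.com/cesarkhan3-cyber/Auto_extraccion_de_perifrasis_verbales_modales_GRADIA | auto_extraccion v1.py | split_inf_and_clitics
-- ===== SOURCE A (Python) =====
-- CLITICS = {"me", "te", "se", "nos", "os", "lo", "la", "los", "las", "le", "les"}
--
-- def split_inf_and_clitics(tok: str):
--     base = tok
--     tail = ""
--     for _ in range(2):
--         matched = False
--         for c in sorted(CLITICS, key=len, reverse=True):
--             if base.endswith(c) and len(base) > len(c):
--                 tail = c + tail
--                 base = base[: -len(c)]
--                 matched = True
--                 break
--         if not matched:
--             break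
--     return base, tail
-- ===== SOURCE B (Python) =====
-- CLITICS = {"me", "te", "se", "nos", "os", "lo", "la", "los", "las", "le", "les"}
--
--
-- def _add(node, rev):
--     # node = [accept, children]; insert one reversed clitic into the trie
--     if not rev:
--         node[0] = True
--     else:
--         child = node[1].get(rev[0])
--         if child is None:
--             child = [False, {}]
--             node[1][rev[0]] = child
--         _add(child, rev[1:])
--
--
-- def _build():
--     root = [False, {}]
--     for c in CLITICS:
--         _add(root, c[::-1])
--     return root
--
--
-- _RTRIE = _build()
--
--
-- def _longest(base):
--     # Walk backward from the end of base through the reversed-clitic trie,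
--     # remembering the deepest accepting depth reached; the range bound keeps
--     # the stripped suffix strictly shorter than base.
--     node, best = _RTRIE, 0
--     for depth in range(1, len(base)):
--         node = node[1].get(base[-depth])
--         if node is None:
--             break
--         if node[0]:
--             best = depth
--     return best
--
--
-- def split_inf_and_clitics(tok: str):
--     base, tail = tok, ""
--     for _ in range(2):
--         l = _longest(base)
--         if l == 0:
--             break
--         tail = base[-l:] + tail
--         base = base[:-l]
--     return base, tail
-- ===== Notes on version B (the rewrite author's own statement) =====
-- stated objective: alternative
-- what changed: B builds a trie of the reversed clitics once and, per pass, walks backward from the token's end through the trie tracking the deepest accepting depth, instead of A's per-pass sort of the clitic set followed by an endswith scan over all clitics.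
import Mathlib
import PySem

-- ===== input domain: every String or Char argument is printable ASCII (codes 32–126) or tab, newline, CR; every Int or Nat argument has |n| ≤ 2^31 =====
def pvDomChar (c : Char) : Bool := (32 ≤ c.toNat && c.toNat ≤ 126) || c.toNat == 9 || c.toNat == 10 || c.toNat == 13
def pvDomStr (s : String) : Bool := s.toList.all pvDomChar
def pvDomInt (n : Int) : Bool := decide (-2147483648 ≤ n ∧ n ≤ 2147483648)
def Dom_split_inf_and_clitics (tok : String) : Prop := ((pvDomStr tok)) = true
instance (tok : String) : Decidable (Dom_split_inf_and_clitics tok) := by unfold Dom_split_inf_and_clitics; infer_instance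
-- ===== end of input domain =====

-- B replaces A's per-pass sort of the clitic set and its endswith scan over all
-- clitics by a reversed-suffix trie built once, walked backward from the end of
-- the token while tracking the deepest accepting depth (objective: alternative).

-- ===== PORT A =====
-- CLITICS = {"me", "te", "se", "nos", "os", "lo", "la", "los", "las", "le", "les"}
def pvCLITICS : PySem.Set (List Char) :=
  PySem.Set.ofList [['m','e'], ['t','e'], ['s','e'], ['n','o','s'], ['o','s'],
                    ['l','o'], ['l','a'], ['l','o','s'], ['l','a','s'], ['l','e'], ['l','e','s']]

-- sorted(CLITICS, key=len, reverse=True)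
def pvSortedA : List (List Char) :=
  PySem.List.sorted pvCLITICS (fun c => c.length) true

-- inner loop: 'for c in sorted(…): if base.endswith(c) and len(base) > len(c): …; break'
-- (first clitic that matches, none if the loop falls through)
def pvFindA : List (List Char) → List Char → Option (List Char)
  | [], _ => none
  | c :: rest, base =>
      if PySem.Chars.endswith base c && decide (c.length < base.length) then some c
      else pvFindA rest base

-- outer loop: 'for _ in range(2)' with break when not matched
def pvLoopA : Nat → List Char → List Char → List Char × List Char
  | 0, base, tail => (base, tail)
  | Nat.succ n, base, tail =>
      match pvFindA pvSortedA base with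
      | some c => pvLoopA n (PySem.List.slice base none (some (-(c.length : Int)))) (c ++ tail)
      | none => (base, tail)

def split_inf_and_clitics (tok : String) : String × String :=
  let (b, t) := pvLoopA 2 tok.toList []
  (String.ofList b, String.ofList t)

-- ===== PORT B =====
-- trie node [accept, children]; the children dict is ported as a total function
-- Char → PvTrie with PvTrie.stop standing for 'key absent' (dict.get returning
-- None); exact because the dict is only ever read through .get.
inductive PvTrie where
  | stop : PvTrie
  | node : Bool → (Char → PvTrie) → PvTrie

def pvChild : PvTrie → Char → PvTrie
  | .stop, _ => .stop
  | .node _ ch, c => ch c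

-- _add(node, rev): Python mutates the node in place; ported functionally
-- (the trie is only read after _build returns, so this is exact)
def PvTrie.add : PvTrie → List Char → PvTrie
  | .stop, [] => .node true (fun _ => .stop)
  | .node _ ch, [] => .node true ch
  | .stop, c :: rest => .node false (fun x => if x = c then PvTrie.add .stop rest else .stop)
  | .node a ch, c :: rest => .node a (fun x => if x = c then PvTrie.add (ch c) rest else ch x)

-- the reversed clitics c[::-1] fed to _add (trie shape is independent of the
-- set's iteration order, so one fixed order is exact)
def pvRC : List (List Char) :=
  [['e','m'], ['e','t'], ['e','s'], ['s','o','n'], ['s','o'],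
   ['o','l'], ['a','l'], ['s','o','l'], ['s','a','l'], ['e','l'], ['s','e','l']]

-- _RTRIE = _build()
def pvRTRIE : PvTrie := pvRC.foldl PvTrie.add (.node false (fun _ => .stop))

-- _longest's loop: chars = base reversed (base[-depth] for depth = 1, 2, …),
-- lim = number of remaining iterations of range(1, len(base))
def pvWalkB : List Char → PvTrie → Nat → Nat → Nat → Nat
  | [], _, _, _, best => best
  | _ :: _, _, 0, _, best => best
  | c :: cs, t, Nat.succ lim, depth, best =>
      match pvChild t c with
      | PvTrie.stop => best
      | PvTrie.node a ch => pvWalkB cs (PvTrie.node a ch) lim (depth + 1) (if a then depth + 1 else best)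

def pvLongest (base : List Char) : Nat :=
  pvWalkB base.reverse pvRTRIE (base.length - 1) 0 0

-- outer loop: 'for _ in range(2)' with break when l == 0
def pvLoopB : Nat → List Char → List Char → List Char × List Char
  | 0, base, tail => (base, tail)
  | Nat.succ n, base, tail =>
      let l := pvLongest base
      if l = 0 then (base, tail)
      else pvLoopB n (PySem.List.slice base none (some (-(l : Int))))
                     (PySem.List.slice base (some (-(l : Int))) none ++ tail)

def split_inf_and_clitics_alt (tok : String) : String × String :=
  let (b, t) := pvLoopB 2 tok.toList []
  (String.ofList b, String.ofList t)

-- ===== PRECONDITION & SPEC =====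
def Spec_split_inf_and_clitics (tok : String) (out : String × String) : Prop := out = split_inf_and_clitics_alt tok
instance (tok : String) (out : String × String) : Decidable (Spec_split_inf_and_clitics tok out) := by unfold Spec_split_inf_and_clitics; infer_instance

-- ===== CLAIM (what is proved, stated in full; the proofs are below) =====
def Claim_equal_split_inf_and_clitics : Prop := ∀ (tok : String), Dom_split_inf_and_clitics tok → Spec_split_inf_and_clitics tok (split_inf_and_clitics tok)

-- ===== LEMMAS AND PROOFS =====

-- sorted(CLITICS, key=len, reverse=True) as a literal: length-3 clitics first
theorem pvSortedA_eq : pvSortedA =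
  [['n','o','s'],['l','o','s'],['l','a','s'],['l','e','s']] ++
  [['m','e'],['t','e'],['s','e'],['o','s'],['l','o'],['l','a'],['l','e']] := by decide

-- base.endswith(c) tests that the last len(c) characters of base are exactly c
theorem pv_endswith_eq (base c : List Char) :
    PySem.Chars.endswith base c = decide (base.drop (base.length - c.length) = c) := by
  rcases Decidable.em (base.drop (base.length - c.length) = c) with h | h
  · simp only [h, decide_true]
    exact (PySem.Chars.endswith_iff base c).mpr (List.suffix_iff_eq_drop.mpr h.symm)
  · simp only [h, decide_false]
    refine Bool.eq_false_iff.mpr ?_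
    intro hc
    exact h (List.suffix_iff_eq_drop.mp ((PySem.Chars.endswith_iff base c).mp hc)).symm

theorem pv_findA_append (xs ys : List (List Char)) (base : List Char) :
    pvFindA (xs ++ ys) base = (pvFindA xs base).or (pvFindA ys base) := by
  induction xs with
  | nil => simp [pvFindA]
  | cons c cs ih =>
      simp only [List.cons_append, pvFindA]
      split
      · rfl
      · exact ih

-- scanning candidates that all have length L returns the length-L suffix iff it is one of them
theorem pv_findA_uniform (L : Nat) (cs : List (List Char))
    (h : ∀ c ∈ cs, c.length = L) (base : List Char) :
    pvFindA cs base =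
      if L < base.length ∧ base.drop (base.length - L) ∈ cs
      then some (base.drop (base.length - L)) else none := by
  induction cs with
  | nil => simp [pvFindA]
  | cons c cs ih =>
      have hc : c.length = L := h c (List.mem_cons_self ..)
      rw [pvFindA, pv_endswith_eq, hc]
      by_cases hlt : L < base.length
      · by_cases he : base.drop (base.length - L) = c
        · simp [he, hlt]
        · have : ¬ (decide (base.drop (base.length - L) = c) && decide (L < base.length)) = true := by
            simp [he]
          rw [if_neg this, ih (fun d hd => h d (List.mem_cons_of_mem _ hd))]
          simp [hlt, List.mem_cons, he]
      · simp [hlt, ih (fun d hd => h d (List.mem_cons_of_mem _ hd))]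

theorem pv_mem3 (x : List Char) (hx : x.length = 3) :
    x ∈ pvCLITICS ↔ x ∈ ([['n','o','s'],['l','o','s'],['l','a','s'],['l','e','s']] : List (List Char)) := by
  match x, hx with
  | [a,b,c], _ => simp [pvCLITICS, PySem.Set.ofList]

theorem pv_mem2 (x : List Char) (hx : x.length = 2) :
    x ∈ pvCLITICS ↔ x ∈ ([['m','e'],['t','e'],['s','e'],['o','s'],['l','o'],['l','a'],['l','e']] : List (List Char)) := by
  match x, hx with
  | [a,b], _ => simp [pvCLITICS, PySem.Set.ofList]

-- A's inner loop: the longest clitic that is a proper suffix, longest first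
theorem pv_findA_char (base : List Char) :
    pvFindA pvSortedA base =
      if 3 < base.length ∧ base.drop (base.length - 3) ∈ pvCLITICS then some (base.drop (base.length - 3))
      else if 2 < base.length ∧ base.drop (base.length - 2) ∈ pvCLITICS then some (base.drop (base.length - 2))
      else none := by
  rw [pvSortedA_eq, pv_findA_append,
      pv_findA_uniform 3 _ (by decide) base,
      pv_findA_uniform 2 _ (by decide) base]
  by_cases h3 : 3 < base.length
  · have L3 : (base.drop (base.length - 3)).length = 3 := by
      simp [List.length_drop]; omega
    by_cases m3 : base.drop (base.length - 3) ∈ pvCLITICS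
    · simp [h3, m3, (pv_mem3 _ L3).mp m3]
    · have m3' : base.drop (base.length - 3) ∉ ([['n','o','s'],['l','o','s'],['l','a','s'],['l','e','s']] : List (List Char)) :=
        fun hm => m3 ((pv_mem3 _ L3).mpr hm)
      have h2 : 2 < base.length := by omega
      have L2 : (base.drop (base.length - 2)).length = 2 := by
        simp [List.length_drop]; omega
      by_cases m2 : base.drop (base.length - 2) ∈ pvCLITICS
      · simp [h3, m3, m3', h2, m2, (pv_mem2 _ L2).mp m2]
      · have m2' : base.drop (base.length - 2) ∉ ([['m','e'],['t','e'],['s','e'],['o','s'],['l','o'],['l','a'],['l','e']] : List (List Char)) :=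
          fun hm => m2 ((pv_mem2 _ L2).mpr hm)
        simp [h3, m3, m3', h2, m2, m2']
  · by_cases h2 : 2 < base.length
    · have L2 : (base.drop (base.length - 2)).length = 2 := by
        simp [List.length_drop]; omega
      by_cases m2 : base.drop (base.length - 2) ∈ pvCLITICS
      · simp [h3, h2, m2, (pv_mem2 _ L2).mp m2]
      · have m2' : base.drop (base.length - 2) ∉ ([['m','e'],['t','e'],['s','e'],['o','s'],['l','o'],['l','a'],['l','e']] : List (List Char)) :=
          fun hm => m2 ((pv_mem2 _ L2).mpr hm)
        simp [h3, h2, m2, m2']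
    · simp [h3, h2]

-- B-side trie facts ---------------------------------------------------------

def pvAccept : PvTrie → Bool
  | .stop => false
  | .node a _ => a

def pvPathAccept : PvTrie → List Char → Bool
  | t, [] => pvAccept t
  | t, c :: cs => pvPathAccept (pvChild t c) cs

theorem pvPathAccept_stop (w : List Char) : pvPathAccept .stop w = false := by
  induction w with
  | nil => rfl
  | cons c cs ih => simpa [pvPathAccept, pvChild] using ih

theorem pvPathAccept_add (u : List Char) : ∀ (t : PvTrie) (w : List Char),
    pvPathAccept (t.add u) w = (decide (w = u) || pvPathAccept t w) := by
  induction u with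
  | nil =>
      intro t w
      cases t <;> cases w <;>
        simp [PvTrie.add, pvPathAccept, pvChild, pvAccept, pvPathAccept_stop]
  | cons c rest ih =>
      intro t w
      cases t with
      | stop =>
          cases w with
          | nil => simp [PvTrie.add, pvPathAccept, pvAccept]
          | cons d ws =>
              by_cases hdc : d = c
              · subst hdc
                simp [PvTrie.add, pvPathAccept, pvChild, ih, pvPathAccept_stop]
              · simp [PvTrie.add, pvPathAccept, pvChild, hdc, pvPathAccept_stop]
      | node a ch =>
          cases w with
          | nil => simp [PvTrie.add, pvPathAccept, pvAccept]
          | cons d ws =>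
              by_cases hdc : d = c
              · subst hdc
                simp [PvTrie.add, pvPathAccept, pvChild, ih]
              · simp [PvTrie.add, pvPathAccept, pvChild, hdc]

theorem pvPathAccept_foldl (ws : List (List Char)) : ∀ (t : PvTrie) (w : List Char),
    pvPathAccept (ws.foldl PvTrie.add t) w = (decide (w ∈ ws) || pvPathAccept t w) := by
  induction ws with
  | nil => intro t w; simp
  | cons u us ih =>
      intro t w
      rw [List.foldl_cons, ih, pvPathAccept_add]
      by_cases h : w = u <;> simp [h, List.mem_cons]

theorem pvPathAccept_RTRIE (w : List Char) :
    pvPathAccept pvRTRIE w = decide (w ∈ pvRC) := by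
  have hroot : pvPathAccept (.node false (fun _ => .stop)) w = false := by
    cases w with
    | nil => rfl
    | cons c cs => simp [pvPathAccept, pvChild, pvPathAccept_stop]
  rw [pvRTRIE, pvPathAccept_foldl, hroot, Bool.or_false]

theorem pv_mem_RC_len (w : List Char) (h : w ∈ pvRC) : w.length = 2 ∨ w.length = 3 := by
  simp only [pvRC, List.mem_cons, List.not_mem_nil, or_false] at h
  rcases h with rfl|rfl|rfl|rfl|rfl|rfl|rfl|rfl|rfl|rfl|rfl <;> simp

-- once three characters have been consumed the trie is dead: the walk keeps best
theorem pvWalk_dead : ∀ (cs : List Char) (t : PvTrie) (lim depth best : Nat),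
    (∀ (c : Char) (w : List Char), pvPathAccept t (c :: w) = false) →
    pvWalkB cs t lim depth best = best := by
  intro cs
  induction cs with
  | nil => intro t lim depth best _; cases lim <;> rfl
  | cons c cs ih =>
      intro t lim depth best h
      cases lim with
      | zero => rfl
      | succ lim =>
          rw [pvWalkB]
          have hacc := h c []
          cases hch : pvChild t c with
          | stop => rfl
          | node a ch =>
              have ha : a = false := by
                have := h c []
                simpa [pvPathAccept, hch, pvAccept] using this
              subst ha
              simp only [Bool.false_eq_true, if_false]
              exact ih _ _ _ _ (fun d w => by
                have := h c (d :: w)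
                simpa [pvPathAccept, hch] using this)

-- B's backward walk returns the longest (proper-suffix) reversed clitic prefix
theorem pvWalk_char (r : List Char) :
    pvWalkB r pvRTRIE (r.length - 1) 0 0 =
      if 4 ≤ r.length ∧ r.take 3 ∈ pvRC then 3
      else if 3 ≤ r.length ∧ r.take 2 ∈ pvRC then 2
      else 0 := by
  match r with
  | [] => simp [pvWalkB]
  | [a] => simp [pvWalkB]
  | a :: b :: rs =>
      have hlim : (a :: b :: rs).length - 1 = rs.length + 1 := by simp
      rw [hlim, pvWalkB]
      cases hT1 : pvChild pvRTRIE a with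
      | stop =>
          have hnot : ∀ w : List Char, (a :: w) ∉ pvRC := by
            intro w hw
            have := pvPathAccept_RTRIE (a :: w)
            rw [pvPathAccept, hT1, pvPathAccept_stop] at this
            simp [hw] at this
          have h2 : ([a, b] : List Char) ∉ pvRC := hnot [b]
          have h3 : a :: b :: rs.take 1 ∉ pvRC := hnot (b :: rs.take 1)
          simp [h2, h3]
      | node a1 ch1 =>
          have ha1 : a1 = false := by
            have := pvPathAccept_RTRIE [a]
            rw [pvPathAccept, hT1] at this
            simpa [pvPathAccept, pvAccept, pvRC] using this
          subst ha1
          simp only [Bool.false_eq_true, if_false]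
          match rs with
          | [] => simp [pvWalkB]
          | c :: rs' =>
              simp only [List.length_cons]
              rw [pvWalkB]
              cases hT2 : pvChild (PvTrie.node false ch1) b with
              | stop =>
                  have hnot : ∀ w : List Char, (a :: b :: w) ∉ pvRC := by
                    intro w hw
                    have := pvPathAccept_RTRIE (a :: b :: w)
                    rw [pvPathAccept, hT1, pvPathAccept, hT2, pvPathAccept_stop] at this
                    simp [hw] at this
                  have h2 : ([a, b] : List Char) ∉ pvRC := hnot []
                  have h3 : ([a, b, c] : List Char) ∉ pvRC := hnot [c]
                  simp [h2, h3]
              | node a2 ch2 =>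
                  have ha2 : a2 = decide ([a, b] ∈ pvRC) := by
                    have := pvPathAccept_RTRIE [a, b]
                    rw [pvPathAccept, hT1, pvPathAccept, hT2] at this
                    simpa [pvPathAccept, pvAccept] using this
                  match rs' with
                  | [] =>
                      by_cases m2 : [a, b] ∈ pvRC <;> simp [pvWalkB, ha2, m2]
                  | d :: rs'' =>
                      simp only [List.length_cons]
                      rw [pvWalkB]
                      cases hT3 : pvChild (PvTrie.node a2 ch2) c with
                      | stop =>
                          have h3 : ([a, b, c] : List Char) ∉ pvRC := by
                            intro hw
                            have := pvPathAccept_RTRIE [a, b, c]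
                            rw [pvPathAccept, hT1, pvPathAccept, hT2, pvPathAccept, hT3,
                                pvPathAccept_stop] at this
                            simp [hw] at this
                          by_cases m2 : [a, b] ∈ pvRC <;> simp [ha2, m2, h3]
                      | node a3 ch3 =>
                          have ha3 : a3 = decide ([a, b, c] ∈ pvRC) := by
                            have := pvPathAccept_RTRIE [a, b, c]
                            rw [pvPathAccept, hT1, pvPathAccept, hT2, pvPathAccept, hT3] at this
                            simpa [pvPathAccept, pvAccept] using this
                          have hdead : ∀ (e : Char) (w : List Char),
                              pvPathAccept (PvTrie.node a3 ch3) (e :: w) = false := by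
                            intro e w
                            have := pvPathAccept_RTRIE (a :: b :: c :: e :: w)
                            rw [pvPathAccept, hT1, pvPathAccept, hT2, pvPathAccept, hT3] at this
                            rw [this]
                            simp only [decide_eq_false_iff_not]
                            intro hm
                            rcases pv_mem_RC_len _ hm with h | h <;> simp at h
                          dsimp only
                          rw [pvWalk_dead _ _ _ _ _ hdead]
                          by_cases m3 : [a, b, c] ∈ pvRC
                          · simp [ha3, m3]
                          · by_cases m2 : [a, b] ∈ pvRC <;> simp [ha2, ha3, m2, m3]

-- bridge: membership in CLITICS of a suffix ↔ membership in pvRC of the reversed prefix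
theorem pv_mem_RC_iff (w : List Char) : w ∈ pvCLITICS ↔ w.reverse ∈ pvRC := by
  have hRC : pvRC = [['m','e'], ['t','e'], ['s','e'], ['n','o','s'], ['o','s'],
                     ['l','o'], ['l','a'], ['l','o','s'], ['l','a','s'], ['l','e'], ['l','e','s']].map List.reverse := by
    decide
  rw [hRC, List.mem_map]
  constructor
  · intro h
    refine ⟨w, ?_, rfl⟩
    simpa [pvCLITICS, PySem.Set.mem_ofList] using h
  · rintro ⟨x, hx, he⟩
    have : x = w := by
      have := congrArg List.reverse he
      simpa using this
    subst this
    simpa [pvCLITICS, PySem.Set.mem_ofList] using hx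

-- _longest(base) in terms of base itself
theorem pvLongest_char (base : List Char) :
    pvLongest base =
      if 3 < base.length ∧ base.drop (base.length - 3) ∈ pvCLITICS then 3
      else if 2 < base.length ∧ base.drop (base.length - 2) ∈ pvCLITICS then 2
      else 0 := by
  have hlen : base.reverse.length = base.length := List.length_reverse
  have htake : ∀ d : Nat, d ≤ base.length →
      ((base.drop (base.length - d) ∈ pvCLITICS) ↔ base.reverse.take d ∈ pvRC) := by
    intro d hd
    rw [pv_mem_RC_iff, List.reverse_drop]
    have : base.length - (base.length - d) = d := by omega
    rw [this]
  rw [pvLongest, ← hlen, pvWalk_char, hlen]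
  by_cases h3 : 3 < base.length
  · rw [if_congr (iff_of_eq (congrArg _ (propext (htake 3 (by omega))))) rfl rfl]
    have : (4 ≤ base.length) = (3 < base.length) := by simp [Nat.lt_iff_add_one_le]
    rw [if_congr (iff_of_eq (congrArg (· ∧ _) this)) rfl rfl]
    by_cases m3 : base.reverse.take 3 ∈ pvRC
    · simp [h3, m3]
    · have h2 : 2 < base.length := by omega
      rw [if_congr (iff_of_eq (congrArg _ (propext (htake 2 (by omega))))) rfl rfl]
      have : (3 ≤ base.length) = (2 < base.length) := by simp [Nat.lt_iff_add_one_le]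
      rw [if_congr (iff_of_eq (congrArg (· ∧ _) this)) rfl rfl]
  · have h4 : ¬ (4 ≤ base.length) := by omega
    simp only [h3, h4, false_and, if_false]
    by_cases h2 : 2 < base.length
    · have h3' : 3 ≤ base.length := by omega
      rw [if_congr (iff_of_eq (congrArg _ (propext (htake 2 (by omega))))) rfl rfl]
      simp [h2, h3']
    · have h3' : ¬ (3 ≤ base.length) := by omega
      simp [h2, h3']

theorem pv_loop_eq : ∀ (n : Nat) (base tail : List Char), pvLoopA n base tail = pvLoopB n base tail := by
  intro n
  induction n with
  | zero => intro base tail; rfl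
  | succ n ih =>
      intro base tail
      rw [pvLoopA, pvLoopB]
      simp only [pv_findA_char, pvLongest_char]
      by_cases h3 : 3 < base.length ∧ base.drop (base.length - 3) ∈ pvCLITICS
      · have L3 : (base.drop (base.length - 3)).length = 3 := by
          simp [List.length_drop]; omega
        simp only [h3.1, h3.2, and_self, if_true, L3,
          PySem.List.slice_from_neg_natCast base 3 (by omega)]
        simpa using ih _ _
      · by_cases h2 : 2 < base.length ∧ base.drop (base.length - 2) ∈ pvCLITICS
        · have L2 : (base.drop (base.length - 2)).length = 2 := by
            simp [List.length_drop]; omega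
          simp only [h3, if_false, h2.1, h2.2, and_self, if_true, L2,
            PySem.List.slice_from_neg_natCast base 2 (by omega)]
          simpa using ih _ _
        · simp [h3, h2]

-- ===== VERDICT (by name: the statement is the Claim_ definition above) =====
theorem split_inf_and_clitics_spec : Claim_equal_split_inf_and_clitics := by
  intro tok _
  unfold Spec_split_inf_and_clitics split_inf_and_clitics split_inf_and_clitics_alt
  rw [pv_loop_eq]
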